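-- pv_equiv track=rewrite | github.com/AWAlexWeber/python-practice | Other/Companies/Amazon/AmazonBlind/ItemsInContainers.py | itemsInContainersBetter
-- ===== SOURCE A (Python) =====
-- from typing import List
--
-- def itemsInContainersBetter(s: str, ranges: List[tuple]) -> List[int]:
--     # Better solution in O(n + k) time and O(n) space, where n is the length of s, and k is the number of ranges.
--     n = len(s)
--
--     # Creating our prefix sums
--     prefix_sums = {}
--     cur_sum = 0
--     for i in range(n):
--         if s[i] == '|':
--             prefix_sums[i] = cur_sum
--         else:
--             cur_sum += 1
--
--     # Building left boundaires
--     left_bounds = [-1] * n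
--     last = -1
--     for i in range(n):
--         if s[i] == '|':
--             last = i
--         left_bounds[i] = last
--
--     # Building right boundaries
--     right_bounds = [-1] * n
--     last = -1
--     for i in reversed(range(n)):
--         if s[i] == '|':
--             last = i
--         right_bounds[i] = last
--
--     # Assembling final output values
--     res = []
--     for start_i, end_i in ranges:
--         start = right_bounds[start_i]
--         end = left_bounds[end_i]
--         if start != -1 and end != -1 and start < end:
--             res.append(prefix_sums[end] - prefix_sums[start])
--         else:
--             res.append(0)
--     return res
-- ===== SOURCE B (Python) =====
-- def itemsInContainersBetter(s, ranges):
--     # For each query, slice out the span from start to end (inclusive) and read the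
--     # wall positions inside it: the items between the first and last wall are the
--     # positions between them that are not walls themselves.
--     res = []
--     for a, b in ranges:
--         span = s[a:b] + s[b]
--         walls = [k for k, c in enumerate(span) if c == '|']
--         if len(walls) < 2:
--             res.append(0)
--         else:
--             res.append(walls[-1] - walls[0] + 1 - len(walls))
--     return res
-- ===== Notes on version B (the rewrite author's own statement) =====
-- stated objective: simpler
-- what changed: Replaces A's three precomputed tables (prefix-sum dict, left/right nearest-pipe arrays) with one inclusive slice per query whose wall positions (first, last, count) give the answer directly.
import Mathlib
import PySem

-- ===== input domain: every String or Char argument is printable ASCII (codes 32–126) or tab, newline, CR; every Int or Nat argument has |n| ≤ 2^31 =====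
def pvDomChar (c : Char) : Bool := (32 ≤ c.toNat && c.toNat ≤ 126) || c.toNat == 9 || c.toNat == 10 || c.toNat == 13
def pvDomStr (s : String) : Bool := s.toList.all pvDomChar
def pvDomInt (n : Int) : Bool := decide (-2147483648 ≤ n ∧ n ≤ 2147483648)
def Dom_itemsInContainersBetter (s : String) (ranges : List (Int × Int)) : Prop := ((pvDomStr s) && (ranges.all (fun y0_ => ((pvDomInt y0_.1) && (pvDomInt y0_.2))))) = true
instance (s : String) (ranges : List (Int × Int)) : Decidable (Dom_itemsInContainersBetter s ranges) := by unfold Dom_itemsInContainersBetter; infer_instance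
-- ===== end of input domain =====

-- B replaces A's three precomputed tables (prefix-sum dict, left/right nearest-pipe arrays)
-- with one inclusive slice per query whose wall positions give the answer directly;
-- objective: simpler, same results.


-- ===== PORT A =====
-- Literal transliteration of A: prefix-sum dict keyed by pipe positions, left/right
-- nearest-pipe tables built by forward/backward loops over range(n), then table
-- lookups per query.  s[i] inside 'for i in range(n)' is always in range and is
-- rendered as l.getD i ' ' (exact there); the query lookups right_bounds[start_i] /
-- left_bounds[end_i] use PySem.List.pyGet? (none = IndexError, excluded by Pre_).
def itemsInContainersBetter (s : String) (ranges : List (Int × Int)) : List Int :=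
  let l := s.toList
  let n := l.length
  let ps := (List.range n).foldl
    (fun (st : PySem.Dict Int Int × Int) i =>
      if l.getD i ' ' = '|' then (st.1.insert (i : Int) st.2, st.2)
      else (st.1, st.2 + 1)) (PySem.Dict.empty, 0)
  let lb := ((List.range n).foldl
    (fun (st : List Int × Int) i =>
      let last := if l.getD i ' ' = '|' then (i : Int) else st.2
      (st.1 ++ [last], last)) ([], -1)).1
  let rb := (((List.range n).reverse).foldl
    (fun (st : List Int × Int) i =>
      let last := if l.getD i ' ' = '|' then (i : Int) else st.2
      (last :: st.1, last)) ([], -1)).1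
  ranges.foldl (fun res q =>
    let start := (PySem.List.pyGet? rb q.1).getD (-1)
    let stop  := (PySem.List.pyGet? lb q.2).getD (-1)
    if start ≠ -1 ∧ stop ≠ -1 ∧ start < stop then
      res ++ [ps.1.getD stop 0 - ps.1.getD start 0]
    else res ++ [0]) []

-- ===== PORT B =====
-- Literal transliteration of Source B: per query, span = s[a:b] + s[b] (s[b] via
-- PySem.List.pyGet?, none = IndexError, defaulted to ' ' only outside Pre_), the wall
-- positions of the span via enumerate+filter, and the answer from the first wall, the
-- last wall and the wall count.  walls[-1] / walls[0] use pyGet? (never none: length ≥ 2).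
def itemsInContainersBetter_alt (s : String) (ranges : List (Int × Int)) : List Int :=
  let cs := s.toList
  ranges.foldl (fun res q =>
    let span := PySem.List.slice cs (some q.1) (some q.2) ++ [(PySem.List.pyGet? cs q.2).getD ' ']
    let walls := ((PySem.List.enumerate span).filter (fun p => p.2 == '|')).map Prod.fst
    if walls.length < 2 then res ++ [0]
    else
      res ++ [(PySem.List.pyGet? walls (-1)).getD 0 - (PySem.List.pyGet? walls 0).getD 0
              + 1 - (walls.length : Int)]) []

-- ===== PRECONDITION & SPEC =====
-- Pre_: every query index is a valid Python index into s (otherwise A raises IndexError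
-- on right_bounds[start_i] / left_bounds[end_i]); A returns normally on exactly these inputs.
def Pre_itemsInContainersBetter (s : String) (ranges : List (Int × Int)) : Prop :=
  ∀ q ∈ ranges, -(s.toList.length : Int) ≤ q.1 ∧ q.1 < s.toList.length ∧
                -(s.toList.length : Int) ≤ q.2 ∧ q.2 < s.toList.length
instance (s : String) (ranges : List (Int × Int)) : Decidable (Pre_itemsInContainersBetter s ranges) := by unfold Pre_itemsInContainersBetter; infer_instance

def pvWitness_itemsInContainersBetter : String × (List (Int × Int)) := ("*|*|*", [(0, 4), (-5, -1), (1, 2)])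

def Spec_itemsInContainersBetter (s : String) (ranges : List (Int × Int)) (out : List Int) : Prop := out = itemsInContainersBetter_alt s ranges
instance (s : String) (ranges : List (Int × Int)) (out : List Int) : Decidable (Spec_itemsInContainersBetter s ranges out) := by unfold Spec_itemsInContainersBetter; infer_instance

-- ===== CLAIM (what is proved, stated in full; the proofs are below) =====
def Claim_equal_itemsInContainersBetter : Prop := ∀ (s : String) (ranges : List (Int × Int)), Dom_itemsInContainersBetter s ranges → Pre_itemsInContainersBetter s ranges → Spec_itemsInContainersBetter s ranges (itemsInContainersBetter s ranges)

-- ===== LEMMAS AND PROOFS =====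
-- pvLP l k: index of the last pipe among the first k characters, else -1 (A's left_bounds[k-1]).
-- pvNP l k: number of non-pipes among the first k characters (A's cur_sum / prefix sums).
-- pvPC l k: number of pipes among the first k characters.
-- pvFindLeft l i: first pipe index ≥ i (l.length if none); pvG encodes it as A's right_bounds.
def pvLP (l : List Char) : Nat → Int
  | 0 => -1
  | k + 1 => if l.getD k ' ' = '|' then (k : Int) else pvLP l k

def pvNP (l : List Char) : Nat → Int
  | 0 => 0
  | k + 1 => pvNP l k + (if l.getD k ' ' = '|' then 0 else 1)

def pvPC (l : List Char) : Nat → Nat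
  | 0 => 0
  | k + 1 => pvPC l k + (if l.getD k ' ' = '|' then 1 else 0)

def pvFindLeft (l : List Char) (i : Nat) : Nat :=
  if i < l.length then (if l.getD i ' ' = '|' then i else pvFindLeft l (i + 1)) else i
termination_by l.length - i

def pvG (l : List Char) (k : Nat) : Int :=
  if pvFindLeft l k < l.length then (pvFindLeft l k : Int) else -1

-- pvWalls t k: the walls list Source B builds for span t when enumeration starts at k.
def pvWalls (t : List Char) (k : Int) : List Int :=
  ((PySem.List.enumerate t k).filter (fun p => p.2 == '|')).map Prod.fst

theorem pvG_step (l : List Char) (k : Nat) (hk : k < l.length) :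
    pvG l k = if l.getD k ' ' = '|' then (k : Int) else pvG l (k + 1) := by
  unfold pvG
  rw [pvFindLeft]
  simp only [if_pos hk]
  by_cases hp : l.getD k ' ' = '|'
  · simp only [if_pos hp, if_pos hk]
  · simp only [if_neg hp]

theorem pvG_len (l : List Char) : pvG l l.length = -1 := by
  unfold pvG; rw [pvFindLeft]; simp

theorem lb_fold (l : List Char) (k : Nat) :
    ∀ (m : Nat) (acc : List Int),
    (List.range' m k).foldl
      (fun (st : List Int × Int) i =>
        let last := if l.getD i ' ' = '|' then (i : Int) else st.2
        (st.1 ++ [last], last)) (acc, pvLP l m)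
    = (acc ++ (List.range' m k).map (fun i => pvLP l (i + 1)), pvLP l (m + k)) := by
  induction k with
  | zero => intro m acc; simp
  | succ k ih =>
      intro m acc
      rw [List.range'_succ, List.foldl_cons]
      have hstep : (if l.getD m ' ' = '|' then (m : Int) else pvLP l m) = pvLP l (m + 1) := rfl
      simp only [hstep]
      rw [ih (m + 1) (acc ++ [pvLP l (m + 1)])]
      rw [show m + (k + 1) = m + 1 + k from by omega]
      simp

theorem lb_eq (l : List Char) :
    (((List.range l.length).foldl
      (fun (st : List Int × Int) i =>
        let last := if l.getD i ' ' = '|' then (i : Int) else st.2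
        (st.1 ++ [last], last)) ([], -1))).1
    = (List.range l.length).map (fun i => pvLP l (i + 1)) := by
  rw [List.range_eq_range']
  have := lb_fold l l.length 0 []
  simp only [show pvLP l 0 = -1 from rfl] at this
  rw [this]
  simp

theorem rb_fold (l : List Char) (k : Nat) (hk : k ≤ l.length) :
    ∀ (acc : List Int),
    ((List.range k).reverse).foldl
      (fun (st : List Int × Int) i =>
        let last := if l.getD i ' ' = '|' then (i : Int) else st.2
        (last :: st.1, last)) (acc, pvG l k)
    = ((List.range k).map (pvG l) ++ acc, pvG l 0) := by
  induction k with
  | zero => intro acc; simp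
  | succ k ih =>
      intro acc
      rw [List.range_succ]
      simp only [List.reverse_append, List.reverse_singleton, List.singleton_append, List.foldl_cons]
      have hstep : (if l.getD k ' ' = '|' then (k : Int) else pvG l (k + 1)) = pvG l k :=
        (pvG_step l k (by omega)).symm
      simp only [hstep]
      rw [ih (by omega) (pvG l k :: acc)]
      simp

theorem rb_eq (l : List Char) :
    ((((List.range l.length).reverse).foldl
      (fun (st : List Int × Int) i =>
        let last := if l.getD i ' ' = '|' then (i : Int) else st.2
        (last :: st.1, last)) ([], -1))).1
    = (List.range l.length).map (pvG l) := by
  have h := rb_fold l l.length (le_refl _) []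
  rw [pvG_len] at h
  rw [h]
  simp

theorem ps_fold (l : List Char) (k : Nat) :
    ∀ (m : Nat) (d : PySem.Dict Int Int),
    (let st := (List.range' m k).foldl
      (fun (st : PySem.Dict Int Int × Int) i =>
        if l.getD i ' ' = '|' then (st.1.insert (i : Int) st.2, st.2)
        else (st.1, st.2 + 1)) (d, pvNP l m)
     st.2 = pvNP l (m + k) ∧
     ∀ p : Nat, st.1.getD (p : Int) 0 =
       if m ≤ p ∧ p < m + k ∧ l.getD p ' ' = '|' then pvNP l p else d.getD (p : Int) 0) := by
  induction k with
  | zero =>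
      intro m d
      refine ⟨by simp, ?_⟩
      intro p
      simp only [List.range'_zero, List.foldl_nil]
      rw [if_neg (by omega)]
  | succ k ih =>
      intro m d
      rw [List.range'_succ, List.foldl_cons]
      by_cases hp : l.getD m ' ' = '|'
      · have hnp : pvNP l (m + 1) = pvNP l m := by rw [show pvNP l (m + 1) = pvNP l m + (if l.getD m ' ' = '|' then 0 else 1) from rfl, if_pos hp]; ring
        simp only [if_pos hp]
        rw [show pvNP l m = pvNP l (m + 1) from hnp.symm]
        obtain ⟨h2, h1⟩ := ih (m + 1) (d.insert (m : Int) (pvNP l (m + 1)))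
        refine ⟨by rw [h2]; congr 1; omega, ?_⟩
        intro p
        rw [h1 p, PySem.Dict.getD_insert]
        by_cases hpm : p = m
        · subst hpm
          rw [if_neg (by omega), if_pos rfl, if_pos ⟨le_refl _, by omega, hp⟩, hnp]
        · have : ¬ ((p : Int) = (m : Int)) := by exact_mod_cast hpm
          rw [if_neg this]
          by_cases hc : m + 1 ≤ p ∧ p < m + 1 + k ∧ l.getD p ' ' = '|'
          · rw [if_pos hc, if_pos ⟨by omega, by omega, hc.2.2⟩]
          · rw [if_neg hc, if_neg (by
              rintro ⟨ha, hb, hcc⟩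
              exact hc ⟨by omega, by omega, hcc⟩)]
      · have hnp : pvNP l (m + 1) = pvNP l m + 1 := by rw [show pvNP l (m + 1) = pvNP l m + (if l.getD m ' ' = '|' then 0 else 1) from rfl, if_neg hp]
        simp only [if_neg hp]
        rw [show pvNP l m + 1 = pvNP l (m + 1) from hnp.symm]
        obtain ⟨h2, h1⟩ := ih (m + 1) d
        refine ⟨by rw [h2]; congr 1; omega, ?_⟩
        intro p
        rw [h1 p]
        by_cases hc : m + 1 ≤ p ∧ p < m + 1 + k ∧ l.getD p ' ' = '|'
        · rw [if_pos hc, if_pos ⟨by omega, by omega, hc.2.2⟩]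
        · rw [if_neg hc, if_neg (by
            rintro ⟨ha, hb, hcc⟩
            by_cases hm : p = m
            · subst hm; exact hp hcc
            · exact hc ⟨by omega, by omega, hcc⟩)]

theorem ps_getD (l : List Char) (p : Nat) (hp : l.getD p ' ' = '|') (hpn : p < l.length) :
    (((List.range l.length).foldl
      (fun (st : PySem.Dict Int Int × Int) i =>
        if l.getD i ' ' = '|' then (st.1.insert (i : Int) st.2, st.2)
        else (st.1, st.2 + 1)) (PySem.Dict.empty, 0))).1.getD (p : Int) 0 = pvNP l p := by
  rw [List.range_eq_range']
  have := (ps_fold l l.length 0 PySem.Dict.empty).2 p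
  simp only [show pvNP l 0 = 0 from rfl] at this
  rw [this, if_pos ⟨by omega, by omega, hp⟩]

theorem pyGet?_norm {α : Type} (xs : List α) (i : Int)
    (h1 : -(xs.length : Int) ≤ i) (h2 : i < xs.length) :
    PySem.List.pyGet? xs i = xs[(if i < 0 then i + xs.length else i).toNat]? := by
  by_cases hneg : i < 0
  · have hk : i = -(((-i).toNat : Nat) : Int) := by omega
    rw [hk, PySem.List.pyGet?_neg_natCast xs (-i).toNat (by omega) (by omega)]
    rw [if_pos (by omega)]
    congr 1
    omega
  · rw [PySem.List.pyGet?_of_nonneg xs (by omega), if_neg hneg]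

theorem pipe_lt_length (l : List Char) (p : Nat) (h : l.getD p ' ' = '|') : p < l.length := by
  by_contra hc
  rw [List.getD_eq_getElem?_getD, List.getElem?_eq_none (by omega)] at h
  simp at h

-- basic facts about pvFindLeft / pvLP / pvPC
theorem pvFindLeft_ge (l : List Char) (i : Nat) : i ≤ pvFindLeft l i := by
  fun_induction pvFindLeft l i with
  | case1 i h hp => exact le_refl i
  | case2 i h hp ih => omega
  | case3 i h => exact le_refl i

theorem pvFindLeft_pipe (l : List Char) (i : Nat) :
    pvFindLeft l i < l.length → l.getD (pvFindLeft l i) ' ' = '|' := by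
  fun_induction pvFindLeft l i with
  | case1 i h hp => intro _; exact hp
  | case2 i h hp ih => exact ih
  | case3 i h => intro hc; omega

theorem pvFindLeft_min (l : List Char) (i : Nat) :
    ∀ p, i ≤ p → l.getD p ' ' = '|' → pvFindLeft l i ≤ p := by
  fun_induction pvFindLeft l i with
  | case1 i h hp => intro p hip _; exact hip
  | case2 i h hp ih =>
      intro p hip hpp
      have : i ≠ p := by rintro rfl; exact hp hpp
      exact ih p (by omega) hpp
  | case3 i h =>
      intro p hip hpp
      have := pipe_lt_length l p hpp
      omega

theorem pvLP_cases (l : List Char) (k : Nat) :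
    pvLP l k = -1 ∨ (0 ≤ pvLP l k ∧ pvLP l k < k ∧ l.getD (pvLP l k).toNat ' ' = '|') := by
  induction k with
  | zero => left; rfl
  | succ k ih =>
      rw [pvLP]
      split
      · right; refine ⟨by omega, by omega, ?_⟩; simpa using ‹_›
      · rcases ih with h | h
        · left; exact h
        · right; exact ⟨h.1, by omega, h.2.2⟩

theorem pvLP_max (l : List Char) (k : Nat) :
    ∀ p : Nat, p < k → l.getD p ' ' = '|' → (p : Int) ≤ pvLP l k := by
  induction k with
  | zero => intro p h; omega
  | succ k ih =>
      intro p hp hpipe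
      rw [pvLP]
      by_cases hk : l.getD k ' ' = '|'
      · rw [if_pos hk]; omega
      · rw [if_neg hk]
        have : p ≠ k := by rintro rfl; exact hk hpipe
        exact ih p (by omega) hpipe

theorem pvLP_cons (c : Char) (u : List Char) :
    ∀ k, pvLP (c :: u) (k + 1)
      = if pvLP u k = -1 then (if c = '|' then 0 else -1) else pvLP u k + 1 := by
  intro k
  induction k with
  | zero =>
      show (if (c :: u).getD 0 ' ' = '|' then (0:Int) else pvLP (c :: u) 0) = _
      simp [pvLP]
  | succ k ih =>
      show (if (c :: u).getD (k+1) ' ' = '|' then ((k+1 : Nat) : Int) else pvLP (c :: u) (k+1)) = _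
      have hg : (c :: u).getD (k+1) ' ' = u.getD k ' ' := by simp
      rw [hg, ih]
      show _ = if (if u.getD k ' ' = '|' then (k:Int) else pvLP u k) = -1 then _
               else (if u.getD k ' ' = '|' then (k:Int) else pvLP u k) + 1
      by_cases hp : u.getD k ' ' = '|'
      · rw [if_pos hp, if_pos hp, if_neg (by omega)]
        push_cast; ring
      · rw [if_neg hp, if_neg hp]

theorem pvNP_add_pvPC (l : List Char) (k : Nat) : pvNP l k + (pvPC l k : Int) = k := by
  induction k with
  | zero => rfl
  | succ k ih =>
      rw [show pvNP l (k + 1) = pvNP l k + (if l.getD k ' ' = '|' then 0 else 1) from rfl,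
          show pvPC l (k + 1) = pvPC l k + (if l.getD k ' ' = '|' then 1 else 0) from rfl]
      by_cases hp : l.getD k ' ' = '|'
      · rw [if_pos hp, if_pos hp]; push_cast; omega
      · rw [if_neg hp, if_neg hp]; push_cast; omega

theorem pvPC_mono (l : List Char) (j k : Nat) (h : j ≤ k) : pvPC l j ≤ pvPC l k := by
  induction k with
  | zero =>
      have hj : j = 0 := by omega
      subst hj; exact le_refl _
  | succ k ih =>
      by_cases hj : j = k + 1
      · subst hj; exact le_refl _
      · have h1 := ih (by omega)
        have h2 : pvPC l (k + 1) = pvPC l k + (if l.getD k ' ' = '|' then 1 else 0) := rfl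
        have h3 : pvPC l k ≤ pvPC l (k + 1) := by rw [h2]; exact Nat.le_add_right _ _
        omega

theorem pvPC_pipe_succ (l : List Char) (p : Nat) (hp : l.getD p ' ' = '|') :
    pvPC l (p + 1) = pvPC l p + 1 := by
  rw [show pvPC l (p + 1) = pvPC l p + (if l.getD p ' ' = '|' then 1 else 0) from rfl, if_pos hp]

theorem pvPC_const (l : List Char) (r k : Nat) (hrk : r ≤ k)
    (h : ∀ p, r ≤ p → p < k → l.getD p ' ' ≠ '|') : pvPC l k = pvPC l r := by
  induction k with
  | zero =>
      have : r = 0 := by omega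
      subst this; rfl
  | succ k ih =>
      by_cases hr : r = k + 1
      · subst hr; rfl
      · rw [show pvPC l (k + 1) = pvPC l k + (if l.getD k ' ' = '|' then 1 else 0) from rfl,
            if_neg (h k (by omega) (by omega))]
        exact ih (by omega) (fun p h1 h2 => h p h1 (by omega))

-- walls characterization
theorem pvWalls_cons (c : Char) (u : List Char) (k : Int) :
    pvWalls (c :: u) k = (if c = '|' then [k] else []) ++ pvWalls u (k + 1) := by
  by_cases h : c = '|' <;>
    simp [pvWalls, PySem.List.enumerate, h]

theorem pvFindLeft_cons_succ (c : Char) (u : List Char) (j : Nat) :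
    pvFindLeft (c :: u) (j + 1) = pvFindLeft u j + 1 := by
  fun_induction pvFindLeft u j with
  | case1 j h hp =>
      rw [pvFindLeft]
      rw [if_pos (by simpa using Nat.succ_lt_succ h)]
      rw [if_pos (by simpa using hp)]
  | case2 j h hp ih =>
      rw [pvFindLeft]
      rw [if_pos (by simpa using Nat.succ_lt_succ h)]
      rw [if_neg (by simpa using hp)]
      exact ih
  | case3 j h =>
      rw [pvFindLeft]
      rw [if_neg (by simp; omega)]

theorem pvWalls_length (t : List Char) : ∀ k, (pvWalls t k).length = t.countP (fun ch => ch == '|') := by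
  induction t with
  | nil => intro k; simp [pvWalls, PySem.List.enumerate]
  | cons c u ih =>
      intro k
      rw [pvWalls_cons, List.countP_cons]
      by_cases h : c = '|' <;> simp [h, ih (k + 1)]

theorem pvWalls_head (t : List Char) : ∀ k : Int,
    (pvWalls t k).head? = if pvFindLeft t 0 < t.length then some (k + (pvFindLeft t 0 : Int)) else none := by
  induction t with
  | nil =>
      intro k
      rw [if_neg (by rw [pvFindLeft]; simp)]
      simp [pvWalls, PySem.List.enumerate]
  | cons c u ih =>
      intro k
      rw [pvWalls_cons]
      have hfl : pvFindLeft (c :: u) 0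
          = if c = '|' then 0 else pvFindLeft u 0 + 1 := by
        rw [pvFindLeft]
        rw [if_pos (by simp)]
        by_cases h : c = '|'
        · rw [if_pos (by simpa using h), if_pos h]
        · rw [if_neg (by simpa using h), if_neg h, pvFindLeft_cons_succ]
      by_cases h : c = '|'
      · rw [if_pos h] at hfl
        rw [hfl]
        simp [h, if_pos (by simp : (0:Nat) < (c::u).length)]
      · rw [if_neg h] at hfl
        rw [hfl]
        simp only [h, if_false, List.nil_append]
        rw [ih (k + 1)]
        by_cases hc : pvFindLeft u 0 < u.length
        · rw [if_pos hc, if_pos (by simp; omega)]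
          congr 1
          push_cast
          ring
        · rw [if_neg hc, if_neg (by simp; omega)]

theorem pvWalls_last (t : List Char) : ∀ k : Int,
    (pvWalls t k).getLast? = if pvLP t t.length = -1 then none else some (k + pvLP t t.length) := by
  induction t with
  | nil =>
      intro k
      simp [pvWalls, PySem.List.enumerate, pvLP]
  | cons c u ih =>
      intro k
      rw [pvWalls_cons, List.getLast?_append, ih (k + 1)]
      simp only [List.length_cons]
      rw [pvLP_cons]
      by_cases h : pvLP u u.length = -1
      · rw [if_pos h, if_pos h]
        simp only [Option.none_or]
        by_cases hc : c = '|'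
        · rw [if_pos hc, if_pos hc, if_neg (by omega)]
          simp [hc]
        · rw [if_neg hc, if_neg hc, if_pos rfl]
          simp [hc]
      · rw [if_neg h, if_neg h]
        simp only [Option.some_or]
        rcases pvLP_cases u u.length with h' | h'
        · exact absurd h' h
        split_ifs with hx
        · exact absurd hx (by omega)
        · congr 1
          ring

-- segment lemmas: the span is take m (drop A l); its pipes are l's pipes in [A, A+m)
theorem seg_len (l : List Char) (A m : Nat) (hm : A + m ≤ l.length) :
    (List.take m (List.drop A l)).length = m := by
  simp
  omega

theorem seg_getD (l : List Char) (A m k : Nat) (hm : A + m ≤ l.length) (hk : k < m) :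
    (List.take m (List.drop A l)).getD k ' ' = l.getD (A + k) ' ' := by
  rw [List.getD_eq_getElem?_getD, List.getD_eq_getElem?_getD,
      List.getElem?_take, if_pos hk, List.getElem?_drop]

theorem seg_findLeft_top (l : List Char) (A m : Nat) (hm : A + m ≤ l.length) :
    pvFindLeft (List.take m (List.drop A l)) m
      = if pvFindLeft l (A + m) < A + m then pvFindLeft l (A + m) - A else m := by
  rw [pvFindLeft, if_neg (by rw [seg_len l A m hm]; omega)]
  have := pvFindLeft_ge l (A + m)
  rw [if_neg (by omega)]

theorem seg_findLeft_aux (l : List Char) (A m : Nat) (hm : A + m ≤ l.length) :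
    ∀ d j, j ≤ m → m - j ≤ d →
    pvFindLeft (List.take m (List.drop A l)) j
      = if pvFindLeft l (A + j) < A + m then pvFindLeft l (A + j) - A else m := by
  intro d
  induction d with
  | zero =>
      intro j hj hd
      have hjm : j = m := by omega
      rw [hjm]
      exact seg_findLeft_top l A m hm
  | succ d ih =>
      intro j hj hd
      by_cases hjm : j = m
      · rw [hjm]
        exact seg_findLeft_top l A m hm
      · have hjlt : j < m := by omega
        rw [pvFindLeft, if_pos (by rw [seg_len l A m hm]; omega), seg_getD l A m j hm hjlt]
        conv_rhs => rw [pvFindLeft]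
        rw [if_pos (show A + j < l.length by omega)]
        by_cases hp : l.getD (A + j) ' ' = '|'
        · rw [if_pos hp, if_pos hp, if_pos (by omega)]
          omega
        · rw [if_neg hp, if_neg hp, ih (j + 1) (by omega) (by omega)]
          rw [show A + j + 1 = A + (j + 1) from by omega]

theorem seg_findLeft (l : List Char) (A m : Nat) (hm : A + m ≤ l.length) :
    pvFindLeft (List.take m (List.drop A l)) 0
      = if pvFindLeft l A < A + m then pvFindLeft l A - A else m := by
  have := seg_findLeft_aux l A m hm m 0 (by omega) (by omega)
  simpa using this

theorem seg_LP (l : List Char) (A m : Nat) (hm : A + m ≤ l.length) :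
    ∀ k, k ≤ m →
    pvLP (List.take m (List.drop A l)) k
      = if (A : Int) ≤ pvLP l (A + k) then pvLP l (A + k) - A else -1 := by
  intro k
  induction k with
  | zero =>
      intro _
      rcases pvLP_cases l (A + 0) with h | h
      · rw [show pvLP (List.take m (List.drop A l)) 0 = -1 from rfl]
        rw [if_neg (by omega)]
      · rw [show pvLP (List.take m (List.drop A l)) 0 = -1 from rfl]
        rw [if_neg (by omega)]
  | succ k ih =>
      intro hk
      have hkm : k < m := by omega
      rw [pvLP, seg_getD l A m k hm hkm]
      rw [show A + (k + 1) = (A + k) + 1 from by omega, pvLP]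
      by_cases hp : l.getD (A + k) ' ' = '|'
      · rw [if_pos hp, if_pos hp, if_pos (by push_cast; omega)]
        push_cast
        ring
      · rw [if_neg hp, if_neg hp, ih (by omega)]

theorem seg_count (l : List Char) (A : Nat) :
    ∀ m, A + m ≤ l.length →
    pvPC l A + (List.take m (List.drop A l)).countP (fun ch => ch == '|') = pvPC l (A + m) := by
  intro m
  induction m with
  | zero => intro _; simp
  | succ m ih =>
      intro hm
      have hel : (List.drop A l)[m]? = some (l.getD (A + m) ' ') := by
        rw [List.getElem?_drop, List.getElem?_eq_getElem (by omega)]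
        congr 1
        rw [List.getD_eq_getElem?_getD, List.getElem?_eq_getElem (by omega)]
        rfl
      rw [List.take_add_one, hel, List.countP_append]
      have hone : List.countP (fun ch => ch == '|') (some (l.getD (A + m) ' ')).toList
          = (if l.getD (A + m) ' ' = '|' then 1 else 0) := by
        by_cases hp : l.getD (A + m) ' ' = '|' <;> simp [hp]
      rw [hone]
      have hih := ih (by omega)
      rw [show A + (m + 1) = (A + m) + 1 from by omega,
          show pvPC l ((A + m) + 1) = pvPC l (A + m) + (if l.getD (A + m) ' ' = '|' then 1 else 0) from rfl]
      by_cases hp : l.getD (A + m) ' ' = '|'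
      · rw [if_pos hp]; omega
      · rw [if_neg hp]; omega

-- normalized Python index = clampIdx, for in-range indices
theorem clampIdx_eq_norm (n : Nat) (i : Int) (h1 : -(n : Int) ≤ i) (h2 : i < n) :
    PySem.List.clampIdx n i = (if i < 0 then i + n else i).toNat := by
  unfold PySem.List.clampIdx
  rcases lt_or_ge i 0 with h | h
  · rw [if_pos h, if_pos h, if_neg (by omega)]
    omega
  · rw [if_neg (by omega), if_neg (by omega), Nat.min_eq_left (by omega)]

-- the per-query value of port B, in terms of pvFindLeft / pvLP / pvNP
theorem bside_eq (l : List Char) (res : List Int) (q1 q2 : Int)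
    (h1 : -(l.length : Int) ≤ q1) (h2 : q1 < l.length)
    (h3 : -(l.length : Int) ≤ q2) (h4 : q2 < l.length) :
    (let span := PySem.List.slice l (some q1) (some q2) ++ [(PySem.List.pyGet? l q2).getD ' '];
     let walls := ((PySem.List.enumerate span).filter (fun p => p.2 == '|')).map Prod.fst;
     if walls.length < 2 then res ++ [0]
     else
       res ++ [(PySem.List.pyGet? walls (-1)).getD 0 - (PySem.List.pyGet? walls 0).getD 0
               + 1 - (walls.length : Int)])
    =
    (if ((((if q1 < 0 then q1 + l.length else q1).toNat : Int)
            ≤ pvLP l ((if q2 < 0 then q2 + l.length else q2).toNat + 1))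
        ∧ ((pvFindLeft l (if q1 < 0 then q1 + l.length else q1).toNat : Int)
            < pvLP l ((if q2 < 0 then q2 + l.length else q2).toNat + 1))) then
      res ++ [pvNP l (pvLP l ((if q2 < 0 then q2 + l.length else q2).toNat + 1)).toNat
              - pvNP l (pvFindLeft l (if q1 < 0 then q1 + l.length else q1).toNat)]
    else res ++ [0]) := by
  set n := l.length with hn
  set A' := (if q1 < 0 then q1 + (n : Int) else q1).toNat with hA
  set B' := (if q2 < 0 then q2 + (n : Int) else q2).toNat with hB
  have hA'n : A' < n := by rw [hA]; split_ifs <;> omega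
  have hB'n : B' < n := by rw [hB]; split_ifs <;> omega
  have hcB : PySem.List.pyGet? l q2 = some (l.getD B' ' ') := by
    rw [pyGet?_norm l q2 h3 h4, ← hn, ← hB,
        List.getElem?_eq_getElem (show B' < l.length from hB'n)]
    congr 1
    rw [List.getD_eq_getElem?_getD, List.getElem?_eq_getElem (show B' < l.length from hB'n)]
    rfl
  have hslice : PySem.List.slice l (some q1) (some q2)
      = List.take (B' - A') (List.drop A' l) := by
    show List.take (PySem.List.clampIdx l.length q2 - PySem.List.clampIdx l.length q1)
          (List.drop (PySem.List.clampIdx l.length q1) l) = _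
    rw [clampIdx_eq_norm l.length q1 h1 h2, clampIdx_eq_norm l.length q2 h3 h4, ← hn, ← hA, ← hB]
  rw [hcB, hslice]
  simp only [Option.getD_some]
  by_cases hAB : A' ≤ B'
  · -- inclusive span = take (B' - A' + 1) (drop A' l)
    have hspan : List.take (B' - A') (List.drop A' l) ++ [l.getD B' ' ']
        = List.take (B' - A' + 1) (List.drop A' l) := by
      rw [List.take_add_one]
      congr 1
      rw [List.getElem?_drop, List.getElem?_eq_getElem (show A' + (B' - A') < l.length by omega)]
      simp only [Option.toList_some]
      congr 1
      rw [List.getD_eq_getElem?_getD, List.getElem?_eq_getElem (show B' < l.length from hB'n)]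
      simp only [Option.getD_some]
      congr 1
      omega
    rw [hspan]
    set m := B' - A' + 1 with hmdef
    have hmn : A' + m ≤ n := by omega
    set t := List.take m (List.drop A' l) with ht
    rw [show ((PySem.List.enumerate t 0).filter (fun p => p.2 == '|')).map Prod.fst
          = pvWalls t 0 from rfl]
    have hlen : (pvWalls t 0).length + pvPC l A' = pvPC l (A' + m) := by
      rw [pvWalls_length t 0, ht]
      have := seg_count l A' m hmn
      omega
    rw [show B' + 1 = A' + m from by omega]
    set L := pvFindLeft l A' with hL
    set R := pvLP l (A' + m) with hR
    have hLA : A' ≤ L := pvFindLeft_ge l A'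
    by_cases hpipe : (A' : Int) ≤ R
    · rcases pvLP_cases l (A' + m) with hx | ⟨hx1, hx2, hx3⟩
      · rw [← hR] at hx; omega
      rw [← hR] at hx1 hx2 hx3
      have hRn : R.toNat < n := pipe_lt_length l R.toNat hx3
      have hLle : L ≤ R.toNat := pvFindLeft_min l A' R.toNat (by omega) hx3
      have hLn : L < n := by omega
      have hLpipe : l.getD L ' ' = '|' := pvFindLeft_pipe l A' hLn
      have hPCA : pvPC l L = pvPC l A' := pvPC_const l A' L hLA
        (fun p hp1 hp2 hpp => absurd (pvFindLeft_min l A' p hp1 hpp) (by omega))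
      have hPCB : pvPC l (A' + m) = pvPC l (R.toNat + 1) := pvPC_const l (R.toNat + 1) (A' + m)
        (by omega)
        (fun p hp1 hp2 hpp => absurd (pvLP_max l (A' + m) p hp2 hpp) (by rw [← hR]; omega))
      have hPCL1 : pvPC l (L + 1) = pvPC l L + 1 := pvPC_pipe_succ l L hLpipe
      have hPCR1 : pvPC l (R.toNat + 1) = pvPC l R.toNat + 1 := pvPC_pipe_succ l R.toNat hx3
      have htLP : pvLP t t.length = R - A' := by
        rw [ht, seg_len l A' m hmn, seg_LP l A' m hmn m (le_refl m), ← hR, if_pos hpipe]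
      have htFL : pvFindLeft t 0 = L - A' := by
        rw [ht, seg_findLeft l A' m hmn, ← hL, if_pos (by omega)]
      by_cases hLR : (L : Int) < R
      · have hmono : pvPC l (L + 1) ≤ pvPC l R.toNat := pvPC_mono l (L + 1) R.toNat (by omega)
        rw [if_neg (show ¬ (pvWalls t 0).length < 2 by omega), if_pos ⟨hpipe, hLR⟩]
        have hgl : PySem.List.pyGet? (pvWalls t 0) (-1) = (pvWalls t 0).getLast? := by
          rw [show (-1 : Int) = -((1 : Nat) : Int) from by norm_num,
              PySem.List.pyGet?_neg_natCast _ 1 (by omega) (by omega),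
              List.getLast?_eq_getElem?]
        have hgh : PySem.List.pyGet? (pvWalls t 0) 0 = (pvWalls t 0).head? := by
          rw [PySem.List.pyGet?_of_nonneg _ (by norm_num)]
          simp [List.head?_eq_getElem?]
        rw [hgl, hgh, pvWalls_last t 0, pvWalls_head t 0, htLP, htFL]
        rw [if_neg (show ¬ (R - (A' : Int)) = -1 by omega),
            if_pos (show L - A' < t.length by rw [ht, seg_len l A' m hmn]; omega)]
        simp only [Option.getD_some]
        have hv : (0 + (R - (A' : Int))) - (0 + ((L - A' : Nat) : Int)) + 1 - ((pvWalls t 0).length : Int)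
            = pvNP l R.toNat - pvNP l L := by
          have e1 := pvNP_add_pvPC l R.toNat
          have e2 := pvNP_add_pvPC l L
          omega
        rw [hv]
      · -- exactly one wall: L = R, count is 1, both sides 0
        have hLeq : (L : Int) = R := by omega
        have hcnt : (pvWalls t 0).length = 1 := by
          have : pvPC l (A' + m) = pvPC l L + 1 := by
            rw [hPCB, hPCR1]
            congr 2
            omega
          omega
        rw [if_pos (by omega), if_neg (by rintro ⟨_, hc2⟩; exact hLR hc2)]
    · -- no wall at all in the span
      have hnop : ∀ p, A' ≤ p → p < A' + m → l.getD p ' ' ≠ '|' := by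
        intro p hp1 hp2 hpp
        have := pvLP_max l (A' + m) p hp2 hpp
        rw [← hR] at this
        omega
      have hcnt0 : pvPC l (A' + m) = pvPC l A' := pvPC_const l A' (A' + m) (by omega) hnop
      rw [if_pos (by omega), if_neg (by rintro ⟨hc1, _⟩; exact hpipe hc1)]
  · -- start beyond end: the span is the single character s[b]
    rw [show B' - A' = 0 from by omega]
    simp only [List.take_zero, List.nil_append]
    rw [show ((PySem.List.enumerate [l.getD B' ' '] 0).filter (fun p => p.2 == '|')).map Prod.fst
          = pvWalls [l.getD B' ' '] 0 from rfl]
    have hc1 : (pvWalls [l.getD B' ' '] 0).length < 2 := by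
      rw [pvWalls_length]
      have : List.countP (fun ch => ch == '|') [l.getD B' ' '] ≤ 1 := by
        rw [List.countP_singleton]
        split <;> omega
      omega
    rw [if_pos hc1]
    rcases pvLP_cases l (B' + 1) with hx | ⟨hx1, hx2, hx3⟩
    · rw [if_neg (by rintro ⟨hc, _⟩; omega)]
    · rw [if_neg (by rintro ⟨hc, _⟩; omega)]

theorem main_thm (s : String) (ranges : List (Int × Int))
    (hpre : ∀ q ∈ ranges, -(s.toList.length : Int) ≤ q.1 ∧ q.1 < s.toList.length ∧
                -(s.toList.length : Int) ≤ q.2 ∧ q.2 < s.toList.length) :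
    itemsInContainersBetter s ranges = itemsInContainersBetter_alt s ranges := by
  unfold itemsInContainersBetter itemsInContainersBetter_alt
  simp only [rb_eq, lb_eq]
  set l := s.toList with hl
  apply PySem.List.foldl_congr_mem
  intro acc q hq
  obtain ⟨ha1, ha2, hb1, hb2⟩ := hpre q hq
  have hstart : (PySem.List.pyGet? ((List.range l.length).map (pvG l)) q.1).getD (-1)
      = pvG l ((if q.1 < 0 then q.1 + (l.length : Int) else q.1)).toNat := by
    rw [pyGet?_norm _ q.1 (by simp; omega) (by simp; omega)]
    simp only [List.length_map, List.length_range]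
    rw [List.getElem?_map, List.getElem?_range (by split <;> omega)]
    rfl
  have hstop : (PySem.List.pyGet? ((List.range l.length).map (fun i => pvLP l (i + 1))) q.2).getD (-1)
      = pvLP l (((if q.2 < 0 then q.2 + (l.length : Int) else q.2)).toNat + 1) := by
    rw [pyGet?_norm _ q.2 (by simp; omega) (by simp; omega)]
    simp only [List.length_map, List.length_range]
    rw [List.getElem?_map, List.getElem?_range (by split <;> omega)]
    rfl
  rw [hstart, hstop, bside_eq l acc q.1 q.2 ha1 ha2 hb1 hb2]
  set A' := (if q.1 < 0 then q.1 + (l.length : Int) else q.1).toNat with hA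
  set B' := (if q.2 < 0 then q.2 + (l.length : Int) else q.2).toNat with hB
  have hA'n : A' < l.length := by rw [hA]; split_ifs <;> omega
  have hB'n : B' < l.length := by rw [hB]; split_ifs <;> omega
  set L := pvFindLeft l A' with hL
  set R := pvLP l (B' + 1) with hR
  have hLA : A' ≤ L := pvFindLeft_ge l A'
  by_cases hcond : (A' : Int) ≤ R ∧ (L : Int) < R
  · obtain ⟨hpipe, hLR⟩ := hcond
    rcases pvLP_cases l (B' + 1) with hx | ⟨hx1, hx2, hx3⟩
    · rw [← hR] at hx; omega
    rw [← hR] at hx1 hx2 hx3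
    have hRn : R.toNat < l.length := pipe_lt_length l R.toNat hx3
    have hLn : L < l.length := by
      have := pvFindLeft_min l A' R.toNat (by omega) hx3
      omega
    have hLpipe : l.getD L ' ' = '|' := pvFindLeft_pipe l A' hLn
    have hG : pvG l A' = (L : Int) := by unfold pvG; rw [← hL, if_pos hLn]
    rw [hG, if_pos ⟨by omega, by omega, hLR⟩, if_pos ⟨hpipe, hLR⟩]
    have e1 : (((List.range l.length).foldl
        (fun (st : PySem.Dict Int Int × Int) i =>
          if l.getD i ' ' = '|' then (st.1.insert (i : Int) st.2, st.2)
          else (st.1, st.2 + 1)) (PySem.Dict.empty, 0))).1.getD R 0 = pvNP l R.toNat := by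
      rw [show R = ((R.toNat : Nat) : Int) from by omega]
      exact ps_getD l R.toNat hx3 hRn
    have e2 : (((List.range l.length).foldl
        (fun (st : PySem.Dict Int Int × Int) i =>
          if l.getD i ' ' = '|' then (st.1.insert (i : Int) st.2, st.2)
          else (st.1, st.2 + 1)) (PySem.Dict.empty, 0))).1.getD (L : Int) 0 = pvNP l L := by
      exact ps_getD l L hLpipe hLn
    rw [e1, e2]
  · rw [if_neg hcond]
    rw [if_neg (by
      rintro ⟨g1, g2, g3⟩
      rcases pvLP_cases l (B' + 1) with hx | ⟨hx1, hx2, hx3⟩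
      · rw [← hR] at hx; exact g2 hx
      rw [← hR] at hx1 hx2 hx3
      by_cases hLn : L < l.length
      · have hG : pvG l A' = (L : Int) := by unfold pvG; rw [← hL, if_pos hLn]
        rw [hG] at g3
        exact hcond ⟨by omega, g3⟩
      · have hG : pvG l A' = -1 := by unfold pvG; rw [← hL, if_neg hLn]
        exact g1 hG)]

-- ===== VERDICT (by name: the statement is the Claim_ definition above) =====
theorem itemsInContainersBetter_spec : Claim_equal_itemsInContainersBetter := by
  intro s ranges _ hpre
  unfold Pre_itemsInContainersBetter at hpre
  unfold Spec_itemsInContainersBetter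
  exact main_thm s ranges hpre
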